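-- pv_equiv track=rewrite | github.com/dinoooop/uc | api/core/utils/basic.py | special_floor
-- ===== SOURCE A (Python) =====
-- def special_floor(n: int) -> int:
--     breakpoints = [
--         0,
--         100,
--         1000,
--         5000,
--         10000,
--         50000,
--         100000,
--         500000,
--         1000000,
--         5000000,
--         10000000,
--     ]
--
--     # If n is below the smallest breakpoint return 0
--     if n < breakpoints[0]:
--         return 0
--
--     # Iterate through breakpoints and find the largest one <= n
--     floor_value = 0
--     for bp in breakpoints:
--         if n >= bp:
--             floor_value = bp
--         else:
--             break
--
--     return floor_value
-- ===== SOURCE B (Python) =====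
-- _BREAKPOINTS = [0, 100, 1000, 5000, 10000, 50000, 100000, 500000, 1000000, 5000000, 10000000]
--
-- def special_floor(n: int) -> int:
--     # binary search for the insertion point after the last breakpoint <= n (bisect_right by hand)
--     lo, hi = 0, len(_BREAKPOINTS)
--     while lo < hi:
--         mid = (lo + hi) // 2
--         if n < _BREAKPOINTS[mid]:
--             hi = mid
--         else:
--             lo = mid + 1
--     if lo == 0:
--         return 0
--     return _BREAKPOINTS[lo - 1]
-- ===== Notes on version B (the rewrite author's own statement) =====
-- stated objective: alternative
-- what changed: Replaces the linear forward scan with early break by a hand-written bisect_right binary search over the sorted breakpoints table, returning breakpoints[idx-1] (or 0 when idx==0).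
import Mathlib
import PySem

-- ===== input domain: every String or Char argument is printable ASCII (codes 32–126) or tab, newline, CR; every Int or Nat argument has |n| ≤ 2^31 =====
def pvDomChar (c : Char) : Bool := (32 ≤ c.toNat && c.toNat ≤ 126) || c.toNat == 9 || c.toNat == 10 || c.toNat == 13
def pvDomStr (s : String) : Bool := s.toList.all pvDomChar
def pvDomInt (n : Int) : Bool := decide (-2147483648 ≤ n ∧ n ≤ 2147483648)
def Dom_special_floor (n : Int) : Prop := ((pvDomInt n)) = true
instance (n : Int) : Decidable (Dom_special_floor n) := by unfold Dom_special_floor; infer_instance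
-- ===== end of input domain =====

-- B replaces A's linear scan with a hand-written bisect_right binary search over the same table (alternative decomposition).

-- ===== PORT A =====
def pvBreakpoints : List Int :=
  [0, 100, 1000, 5000, 10000, 50000, 100000, 500000, 1000000, 5000000, 10000000]

-- A's for-loop with early break, carrying floor_value
def pvScanA (n : Int) : List Int → Int → Int
  | [], acc => acc
  | bp :: rest, acc => if n ≥ bp then pvScanA n rest bp else acc

def special_floor (n : Int) : Int :=
  if n < 0 then 0
  else pvScanA n pvBreakpoints 0

-- ===== PORT B =====
-- Source B's while loop (lo < hi), ported with fuel = list length (the loop runs at most ⌈log₂ 12⌉ ≤ 11 times)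
def pvBisectR (x : Int) (a : List Int) : Nat → Nat → Nat → Nat
  | 0, lo, _ => lo
  | fuel+1, lo, hi =>
    if lo < hi then
      let mid := (lo + hi) / 2
      if x < a.getD mid 0 then pvBisectR x a fuel lo mid
      else pvBisectR x a fuel (mid + 1) hi
    else lo

def special_floor_alt (n : Int) : Int :=
  let lo := pvBisectR n pvBreakpoints pvBreakpoints.length 0 pvBreakpoints.length
  if lo = 0 then 0
  else pvBreakpoints.getD (lo - 1) 0

-- ===== PRECONDITION & SPEC =====
def Spec_special_floor (n : Int) (out : Int) : Prop := out = special_floor_alt n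
instance (n : Int) (out : Int) : Decidable (Spec_special_floor n out) := by unfold Spec_special_floor; infer_instance

-- ===== CLAIM (what is proved, stated in full; the proofs are below) =====
def Claim_equal_special_floor : Prop := ∀ (n : Int), Dom_special_floor n → Spec_special_floor n (special_floor n)

-- ===== LEMMAS AND PROOFS =====

theorem special_floor_eval (n : Int) : special_floor n = special_floor_alt n := by
  unfold special_floor special_floor_alt
  by_cases h0 : n < 0
  · simp [pvScanA, pvBisectR, pvBreakpoints, h0, show n < 0 by omega, show ¬ (0:Int) ≤ n by omega, show n < 100 by omega, show ¬ (100:Int) ≤ n by omega, show n < 1000 by omega, show ¬ (1000:Int) ≤ n by omega, show n < 5000 by omega, show ¬ (5000:Int) ≤ n by omega, show n < 10000 by omega, show ¬ (10000:Int) ≤ n by omega, show n < 50000 by omega, show ¬ (50000:Int) ≤ n by omega, show n < 100000 by omega, show ¬ (100000:Int) ≤ n by omega, show n < 500000 by omega, show ¬ (500000:Int) ≤ n by omega, show n < 1000000 by omega, show ¬ (1000000:Int) ≤ n by omega, show n < 5000000 by omega, show ¬ (5000000:Int) ≤ n by omega, show n < 10000000 by omega, show ¬ (10000000:Int) ≤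 n by omega]
  by_cases h1 : n < 100
  · simp [pvScanA, pvBisectR, pvBreakpoints, show ¬ n < 0 by omega, show (0:Int) ≤ n by omega, show n < 100 by omega, show ¬ (100:Int) ≤ n by omega, show n < 1000 by omega, show ¬ (1000:Int) ≤ n by omega, show n < 5000 by omega, show ¬ (5000:Int) ≤ n by omega, show n < 10000 by omega, show ¬ (10000:Int) ≤ n by omega, show n < 50000 by omega, show ¬ (50000:Int) ≤ n by omega, show n < 100000 by omega, show ¬ (100000:Int) ≤ n by omega, show n < 500000 by omega, show ¬ (500000:Int) ≤ n by omega, show n < 1000000 by omega, show ¬ (1000000:Int) ≤ n by omega, show n < 5000000 by omega, show ¬ (5000000:Int) ≤ n by omega, show n < 10000000 by omega, show ¬ (10000000:Int) ≤ n by omega]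
  by_cases h2 : n < 1000
  · simp [pvScanA, pvBisectR, pvBreakpoints, show ¬ n < 0 by omega, show (0:Int) ≤ n by omega, show ¬ n < 100 by omega, show (100:Int) ≤ n by omega, show n < 1000 by omega, show ¬ (1000:Int) ≤ n by omega, show n < 5000 by omega, show ¬ (5000:Int) ≤ n by omega, show n < 10000 by omega, show ¬ (10000:Int) ≤ n by omega, show n < 50000 by omega, show ¬ (50000:Int) ≤ n by omega, show n < 100000 by omega, show ¬ (100000:Int) ≤ n by omega, show n < 500000 by omega, show ¬ (500000:Int) ≤ n by omega, show n < 1000000 by omega, show ¬ (1000000:Int) ≤ n by omega, show n < 5000000 by omega, show ¬ (5000000:Int) ≤ n by omega, show n < 10000000 by omega, show ¬ (10000000:Int) ≤ n by omega]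
  by_cases h3 : n < 5000
  · simp [pvScanA, pvBisectR, pvBreakpoints, show ¬ n < 0 by omega, show (0:Int) ≤ n by omega, show ¬ n < 100 by omega, show (100:Int) ≤ n by omega, show ¬ n < 1000 by omega, show (1000:Int) ≤ n by omega, show n < 5000 by omega, show ¬ (5000:Int) ≤ n by omega, show n < 10000 by omega, show ¬ (10000:Int) ≤ n by omega, show n < 50000 by omega, show ¬ (50000:Int) ≤ n by omega, show n < 100000 by omega, show ¬ (100000:Int) ≤ n by omega, show n < 500000 by omega, show ¬ (500000:Int) ≤ n by omega, show n < 1000000 by omega, show ¬ (1000000:Int) ≤ n by omega, show n < 5000000 by omega, show ¬ (5000000:Int) ≤ n by omega, show n < 10000000 by omega, show ¬ (10000000:Int) ≤ n by omega]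
  by_cases h4 : n < 10000
  · simp [pvScanA, pvBisectR, pvBreakpoints, show ¬ n < 0 by omega, show (0:Int) ≤ n by omega, show ¬ n < 100 by omega, show (100:Int) ≤ n by omega, show ¬ n < 1000 by omega, show (1000:Int) ≤ n by omega, show ¬ n < 5000 by omega, show (5000:Int) ≤ n by omega, show n < 10000 by omega, show ¬ (10000:Int) ≤ n by omega, show n < 50000 by omega, show ¬ (50000:Int) ≤ n by omega, show n < 100000 by omega, show ¬ (100000:Int) ≤ n by omega, show n < 500000 by omega, show ¬ (500000:Int) ≤ n by omega, show n < 1000000 by omega, show ¬ (1000000:Int) ≤ n by omega, show n < 5000000 by omega, show ¬ (5000000:Int) ≤ n by omega, show n < 10000000 by omega, show ¬ (10000000:Int) ≤ n by omega]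
  by_cases h5 : n < 50000
  · simp [pvScanA, pvBisectR, pvBreakpoints, show ¬ n < 0 by omega, show (0:Int) ≤ n by omega, show ¬ n < 100 by omega, show (100:Int) ≤ n by omega, show ¬ n < 1000 by omega, show (1000:Int) ≤ n by omega, show ¬ n < 5000 by omega, show (5000:Int) ≤ n by omega, show ¬ n < 10000 by omega, show (10000:Int) ≤ n by omega, show n < 50000 by omega, show ¬ (50000:Int) ≤ n by omega, show n < 100000 by omega, show ¬ (100000:Int) ≤ n by omega, show n < 500000 by omega, show ¬ (500000:Int) ≤ n by omega, show n < 1000000 by omega, show ¬ (1000000:Int) ≤ n by omega, show n < 5000000 by omega, show ¬ (5000000:Int) ≤ n by omega, show n < 10000000 by omega, show ¬ (10000000:Int) ≤ n by omega]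
  by_cases h6 : n < 100000
  · simp [pvScanA, pvBisectR, pvBreakpoints, show ¬ n < 0 by omega, show (0:Int) ≤ n by omega, show ¬ n < 100 by omega, show (100:Int) ≤ n by omega, show ¬ n < 1000 by omega, show (1000:Int) ≤ n by omega, show ¬ n < 5000 by omega, show (5000:Int) ≤ n by omega, show ¬ n < 10000 by omega, show (10000:Int) ≤ n by omega, show ¬ n < 50000 by omega, show (50000:Int) ≤ n by omega, show n < 100000 by omega, show ¬ (100000:Int) ≤ n by omega, show n < 500000 by omega, show ¬ (500000:Int) ≤ n by omega, show n < 1000000 by omega, show ¬ (1000000:Int) ≤ n by omega, show n < 5000000 by omega, show ¬ (5000000:Int) ≤ n by omega, show n < 10000000 by omega, show ¬ (10000000:Int) ≤ n by omega]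
  by_cases h7 : n < 500000
  · simp [pvScanA, pvBisectR, pvBreakpoints, show ¬ n < 0 by omega, show (0:Int) ≤ n by omega, show ¬ n < 100 by omega, show (100:Int) ≤ n by omega, show ¬ n < 1000 by omega, show (1000:Int) ≤ n by omega, show ¬ n < 5000 by omega, show (5000:Int) ≤ n by omega, show ¬ n < 10000 by omega, show (10000:Int) ≤ n by omega, show ¬ n < 50000 by omega, show (50000:Int) ≤ n by omega, show ¬ n < 100000 by omega, show (100000:Int) ≤ n by omega, show n < 500000 by omega, show ¬ (500000:Int) ≤ n by omega, show n < 1000000 by omega, show ¬ (1000000:Int) ≤ n by omega, show n < 5000000 by omega, show ¬ (5000000:Int) ≤ n by omega, show n < 10000000 by omega, show ¬ (10000000:Int) ≤ n by omega]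
  by_cases h8 : n < 1000000
  · simp [pvScanA, pvBisectR, pvBreakpoints, show ¬ n < 0 by omega, show (0:Int) ≤ n by omega, show ¬ n < 100 by omega, show (100:Int) ≤ n by omega, show ¬ n < 1000 by omega, show (1000:Int) ≤ n by omega, show ¬ n < 5000 by omega, show (5000:Int) ≤ n by omega, show ¬ n < 10000 by omega, show (10000:Int) ≤ n by omega, show ¬ n < 50000 by omega, show (50000:Int) ≤ n by omega, show ¬ n < 100000 by omega, show (100000:Int) ≤ n by omega, show ¬ n < 500000 by omega, show (500000:Int) ≤ n by omega, show n < 1000000 by omega, show ¬ (1000000:Int) ≤ n by omega, show n < 5000000 by omega, show ¬ (5000000:Int) ≤ n by omega, show n < 10000000 by omega, show ¬ (10000000:Int) ≤ n by omega]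
  by_cases h9 : n < 5000000
  · simp [pvScanA, pvBisectR, pvBreakpoints, show ¬ n < 0 by omega, show (0:Int) ≤ n by omega, show ¬ n < 100 by omega, show (100:Int) ≤ n by omega, show ¬ n < 1000 by omega, show (1000:Int) ≤ n by omega, show ¬ n < 5000 by omega, show (5000:Int) ≤ n by omega, show ¬ n < 10000 by omega, show (10000:Int) ≤ n by omega, show ¬ n < 50000 by omega, show (50000:Int) ≤ n by omega, show ¬ n < 100000 by omega, show (100000:Int) ≤ n by omega, show ¬ n < 500000 by omega, show (500000:Int) ≤ n by omega, show ¬ n < 1000000 by omega, show (1000000:Int) ≤ n by omega, show n < 5000000 by omega, show ¬ (5000000:Int) ≤ n by omega, show n < 10000000 by omega, show ¬ (10000000:Int) ≤ n by omega]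
  by_cases h10 : n < 10000000
  · simp [pvScanA, pvBisectR, pvBreakpoints, show ¬ n < 0 by omega, show (0:Int) ≤ n by omega, show ¬ n < 100 by omega, show (100:Int) ≤ n by omega, show ¬ n < 1000 by omega, show (1000:Int) ≤ n by omega, show ¬ n < 5000 by omega, show (5000:Int) ≤ n by omega, show ¬ n < 10000 by omega, show (10000:Int) ≤ n by omega, show ¬ n < 50000 by omega, show (50000:Int) ≤ n by omega, show ¬ n < 100000 by omega, show (100000:Int) ≤ n by omega, show ¬ n < 500000 by omega, show (500000:Int) ≤ n by omega, show ¬ n < 1000000 by omega, show (1000000:Int) ≤ n by omega, show ¬ n < 5000000 by omega, show (5000000:Int) ≤ n by omega, show n < 10000000 by omega, show ¬ (10000000:Int) ≤ n by omega]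
  simp [pvScanA, pvBisectR, pvBreakpoints, show ¬ n < 0 by omega, show (0:Int) ≤ n by omega, show ¬ n < 100 by omega, show (100:Int) ≤ n by omega, show ¬ n < 1000 by omega, show (1000:Int) ≤ n by omega, show ¬ n < 5000 by omega, show (5000:Int) ≤ n by omega, show ¬ n < 10000 by omega, show (10000:Int) ≤ n by omega, show ¬ n < 50000 by omega, show (50000:Int) ≤ n by omega, show ¬ n < 100000 by omega, show (100000:Int) ≤ n by omega, show ¬ n < 500000 by omega, show (500000:Int) ≤ n by omega, show ¬ n < 1000000 by omega, show (1000000:Int) ≤ n by omega, show ¬ n < 5000000 by omega, show (5000000:Int) ≤ n by omega, show ¬ n < 10000000 by omega, show (10000000:Int) ≤ n by omega]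

-- ===== VERDICT (by name: the statement is the Claim_ definition above) =====
theorem special_floor_spec : Claim_equal_special_floor := by
  intro n _
  unfold Spec_special_floor
  exact special_floor_eval n
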